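-- pv_equiv track=rewrite | github.com/jyc0011/backjoon | 백준/Silver/15810. 풍선 공장/풍선 공장.py | min_time_to_make_balloons
-- ===== SOURCE A (Python) =====
-- def balloons_in_time(staff_times, time):
--     total_balloons = 0
--     for t in staff_times:
--         total_balloons += time // t
--     return total_balloons
--
-- def min_time_to_make_balloons(N, M, staff_times):
--     left, right = 0, max(staff_times) * M
--
--     while left <= right:
--         mid = (left + right) // 2
--         total = balloons_in_time(staff_times, mid)
--
--         if total >= M:
--             right = mid - 1
--         else:
--             left = mid + 1
--
--     return left
-- ===== SOURCE B (Python) =====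
-- def min_time_to_make_balloons(N, M, staff_times):
--     # Event-driven simulation with an analytic warm start: jump straight to a
--     # provable lower bound 'start' (fewer than M balloons are finished by then),
--     # then replay completion events one instant at a time until M are produced.
--     if M <= 0:
--         return 0
--     S = 1 << 64
--     w = sum(S // t for t in staff_times)
--     start = max(0, (M * S - 1) // (w + len(staff_times)))
--     T = start
--     produced = sum(start // t for t in staff_times)
--     events = [(t * (start // t + 1), t) for t in staff_times]  # (next completion, interval)
--     while produced < M:
--         T = min(c for c, _ in events)
--         new_events = []
--         for c, t in events:
--             if c == T:
--                 produced += 1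
--                 new_events.append((c + t, t))
--             else:
--                 new_events.append((c, t))
--         events = new_events
--     return T
-- ===== Notes on version B (the rewrite author's own statement) =====
-- stated objective: alternative
-- what changed: Replaces A's binary search over the answer range with an event-driven simulation: each worker carries a next-completion time, the loop jumps to the earliest completion event until M balloons are produced, warm-started at an analytic scaled-integer lower bound so only about n events remain.
-- outside the precondition, e.g. on min_time_to_make_balloons(2, 1, [2, -1]): A returns 3, B returns -1; on min_time_to_make_balloons(2, 2, [-1]): A returns 0, B returns -2; on min_time_to_make_balloons(1, 1, [0]): A raises ZeroDivisionError, B raises ZeroDivisionError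
import Mathlib
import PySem

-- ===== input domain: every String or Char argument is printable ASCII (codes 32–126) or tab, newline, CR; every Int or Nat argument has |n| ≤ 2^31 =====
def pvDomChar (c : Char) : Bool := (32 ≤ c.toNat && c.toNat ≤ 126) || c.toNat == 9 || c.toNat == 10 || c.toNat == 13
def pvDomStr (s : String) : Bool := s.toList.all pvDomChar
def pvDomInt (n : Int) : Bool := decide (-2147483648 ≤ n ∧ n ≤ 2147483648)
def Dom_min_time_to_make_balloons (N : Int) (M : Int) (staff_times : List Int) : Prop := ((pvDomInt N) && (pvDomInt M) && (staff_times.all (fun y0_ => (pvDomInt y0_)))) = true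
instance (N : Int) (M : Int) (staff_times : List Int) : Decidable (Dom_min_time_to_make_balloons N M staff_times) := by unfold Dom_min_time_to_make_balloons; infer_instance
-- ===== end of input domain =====

-- B replaces A's binary search over the answer range with an event-driven simulation that tracks
-- each worker's next completion time and jumps from event to event until M balloons are produced,
-- warm-started at an analytic scaled-integer lower bound (objective: alternative algorithm).

-- ===== PORT A =====
def balloons_in_time (staff_times : List Int) (time : Int) : Int :=
  staff_times.foldl (fun total t => total + PySem.Int.floordiv time t) 0

def pvSearchA (staff_times : List Int) (M : Int) (left right : Int) : Int :=
  if h : left ≤ right then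
    if M ≤ balloons_in_time staff_times (PySem.Int.floordiv (left + right) 2) then
      pvSearchA staff_times M left (PySem.Int.floordiv (left + right) 2 - 1)
    else
      pvSearchA staff_times M (PySem.Int.floordiv (left + right) 2 + 1) right
  else left
termination_by (right + 1 - left).toNat
decreasing_by
  · have hb := PySem.Int.floordiv_two_mid_bounds h
    omega
  · have hb := PySem.Int.floordiv_two_mid_bounds h
    omega

def min_time_to_make_balloons (N : Int) (M : Int) (staff_times : List Int) : Int :=
  match PySem.List.max? staff_times (fun x => x) with
  | some mx => pvSearchA staff_times M 0 (mx * M)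
  | none => 0   -- dead under Pre_: Python's max raises on []

-- ===== PORT B =====
-- the inner 'for c, t in events' loop building new_events and counting finishers
def pvAdvance : List (Int × Int) → Int → Int × List (Int × Int)
  | [], _ => (0, [])
  | (c, t) :: rest, T =>
    let r := pvAdvance rest T
    if c = T then (r.1 + 1, (c + t, t) :: r.2) else (r.1, (c, t) :: r.2)

-- termination helpers cited by pvSim's decreasing_by: the minimum is attained, so ≥ 1 balloon pops
theorem pvAdvance_fst_nonneg (evs : List (Int × Int)) (T : Int) : 0 ≤ (pvAdvance evs T).1 := by
  induction evs with
  | nil => simp [pvAdvance]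
  | cons p rest ih =>
    obtain ⟨c, t⟩ := p
    by_cases hc : c = T
    · simp only [pvAdvance, if_pos hc]
      omega
    · simp only [pvAdvance, if_neg hc]
      exact ih

theorem pvAdvance_fst_pos (evs : List (Int × Int)) (T : Int)
    (h : T ∈ evs.map Prod.fst) : 1 ≤ (pvAdvance evs T).1 := by
  induction evs with
  | nil => simp at h
  | cons p rest ih =>
    obtain ⟨c, t⟩ := p
    by_cases hc : c = T
    · have := pvAdvance_fst_nonneg rest T
      simp only [pvAdvance, if_pos hc]
      omega
    · simp only [List.map_cons, List.mem_cons] at h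
      rcases h with h | h
      · exact absurd h.symm hc
      · simpa only [pvAdvance, if_neg hc] using ih h

-- while produced < M: T = min(...); advance all events at time T
def pvSim (M : Int) (produced T : Int) (evs : List (Int × Int)) : Int :=
  if h : produced < M then
    match hm : PySem.List.min? (evs.map Prod.fst) (fun x => x) with
    | none => T   -- dead under Pre_: Python's min raises on an empty sequence
    | some T' => pvSim M (produced + (pvAdvance evs T').1) T' (pvAdvance evs T').2
  else T
termination_by (M - produced).toNat
decreasing_by
  have h1 := pvAdvance_fst_pos evs T' (PySem.List.min?_mem hm)
  omega

def min_time_to_make_balloons_alt (N : Int) (M : Int) (staff_times : List Int) : Int :=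
  if M ≤ 0 then 0
  else
    let S : Int := 18446744073709551616
    let w := (staff_times.map (fun t => PySem.Int.floordiv S t)).sum
    let start := max 0 (PySem.Int.floordiv (M * S - 1) (w + staff_times.length))
    let produced := (staff_times.map (fun t => PySem.Int.floordiv start t)).sum
    pvSim M produced start
      (staff_times.map (fun t => (t * (PySem.Int.floordiv start t + 1), t)))

-- ===== PRECONDITION & SPEC =====
-- Pre_ excludes the empty list (Python's max raises ValueError) and, when the search loop actually runs
-- (it is skipped whenever M < 0 with a positive maximum, where A just returns 0), lists containing 0
-- (ZeroDivisionError) or negative times, on which A returns but its binary-search bound max*M is invalid,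
-- so the returned value is an artefact of the search, not a meaningful answer.
def Pre_min_time_to_make_balloons (N : Int) (M : Int) (staff_times : List Int) : Prop :=
  staff_times ≠ [] ∧ ((∀ t ∈ staff_times, 1 ≤ t) ∨ (M < 0 ∧ ∃ t ∈ staff_times, 0 < t))
instance (N : Int) (M : Int) (staff_times : List Int) : Decidable (Pre_min_time_to_make_balloons N M staff_times) := by
  unfold Pre_min_time_to_make_balloons; infer_instance

def pvWitness_min_time_to_make_balloons : Int × Int × List Int := (3, 5, [2, 3, 4])

def Spec_min_time_to_make_balloons (N : Int) (M : Int) (staff_times : List Int) (out : Int) : Prop := out = min_time_to_make_balloons_alt N M staff_times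
instance (N : Int) (M : Int) (staff_times : List Int) (out : Int) : Decidable (Spec_min_time_to_make_balloons N M staff_times out) := by unfold Spec_min_time_to_make_balloons; infer_instance

-- ===== CLAIM (what is proved, stated in full; the proofs are below) =====
def Claim_equal_min_time_to_make_balloons : Prop := ∀ (N : Int) (M : Int) (staff_times : List Int), Dom_min_time_to_make_balloons N M staff_times → Pre_min_time_to_make_balloons N M staff_times → Spec_min_time_to_make_balloons N M staff_times (min_time_to_make_balloons N M staff_times)


-- ===== LEMMAS AND PROOFS =====

-- the common count, in Int euclidean division (valid since all times are ≥ 1 under Pre_)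
def countE (staff : List Int) (x : Int) : Int := (staff.map (fun t => x / t)).sum

theorem balloons_eq_countE (ts : List Int) (hpos : ∀ t ∈ ts, 1 ≤ t) (x : Int) :
    balloons_in_time ts x = countE ts x := by
  unfold balloons_in_time countE
  rw [PySem.List.foldl_add]
  rw [zero_add]
  congr 1
  apply List.map_congr_left
  intro t ht
  exact PySem.Int.floordiv_eq_ediv_of_pos (by have := hpos t ht; omega)

theorem countE_mono (ts : List Int) (hpos : ∀ t ∈ ts, 1 ≤ t) {a b : Int} (hab : a ≤ b) :
    countE ts a ≤ countE ts b := by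
  induction ts with
  | nil => simp [countE]
  | cons t ts ih =>
    have ht : 1 ≤ t := hpos t (by simp)
    have h1 : a / t ≤ b / t := Int.ediv_le_ediv (by omega) hab
    have h2 := ih (fun u hu => hpos u (by simp [hu]))
    simp only [countE, List.map_cons, List.sum_cons] at *
    omega

theorem countE_nonneg (ts : List Int) (hpos : ∀ t ∈ ts, 1 ≤ t) {x : Int} (hx : 0 ≤ x) :
    0 ≤ countE ts x := by
  induction ts with
  | nil => simp [countE]
  | cons t ts ih =>
    have ht : 1 ≤ t := hpos t (by simp)
    have h1 : 0 ≤ x / t := Int.ediv_nonneg hx (by omega)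
    have h2 := ih (fun u hu => hpos u (by simp [hu]))
    simp only [countE, List.map_cons, List.sum_cons] at *
    omega

theorem countE_lower (ts : List Int) (hpos : ∀ t ∈ ts, 1 ≤ t) {t0 x : Int} (hm : t0 ∈ ts) (hx : 0 ≤ x) :
    x / t0 ≤ countE ts x := by
  induction ts with
  | nil => simp at hm
  | cons t ts ih =>
    have h2 : 0 ≤ countE ts x := countE_nonneg ts (fun u hu => hpos u (by simp [hu])) hx
    rcases List.mem_cons.mp hm with h | h
    · subst h
      simp only [countE, List.map_cons, List.sum_cons] at *
      omega
    · have ht : 1 ≤ t := hpos t (by simp)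
      have h1 : 0 ≤ x / t := Int.ediv_nonneg hx (by omega)
      have h3 := ih (fun u hu => hpos u (by simp [hu])) h
      simp only [countE, List.map_cons, List.sum_cons] at *
      omega

theorem countE_zero (ts : List Int) (hpos : ∀ t ∈ ts, 1 ≤ t) : countE ts 0 = 0 := by
  induction ts with
  | nil => simp [countE]
  | cons t ts ih =>
    have ht : 1 ≤ t := hpos t (by simp)
    have h1 : (0 : Int) / t = 0 := Int.zero_ediv t
    have h2 := ih (fun u hu => hpos u (by simp [hu]))
    simp only [countE, List.map_cons, List.sum_cons] at *
    omega

theorem countE_congr (ts : List Int) {a b : Int} (h : ∀ t ∈ ts, a / t = b / t) :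
    countE ts a = countE ts b := by
  unfold countE
  rw [List.map_congr_left h]

-- the common characterisation: n is the least nonnegative time with at least M balloons
def IsAnswer (ts : List Int) (M n : Int) : Prop :=
  0 ≤ n ∧ M ≤ countE ts n ∧ ∀ k, 0 ≤ k → k < n → countE ts k < M

theorem answer_unique (ts : List Int) (M : Int) {a b : Int}
    (ha : IsAnswer ts M a) (hb : IsAnswer ts M b) : a = b := by
  by_contra hne
  rcases lt_or_gt_of_ne hne with h | h
  · exact absurd ha.2.1 (not_le.mpr (hb.2.2 a ha.1 h))
  · exact absurd hb.2.1 (not_le.mpr (ha.2.2 b hb.1 h))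

-- ===== A-side: the binary search computes the answer =====
theorem searchA_answer (ts : List Int) (M : Int) (hpos : ∀ t ∈ ts, 1 ≤ t) :
    ∀ (left right : Int), 0 ≤ left → left ≤ right + 1 →
      (∀ k, 0 ≤ k → k < left → countE ts k < M) →
      M ≤ countE ts (right + 1) →
      IsAnswer ts M (pvSearchA ts M left right) := by
  intro left right
  induction left, right using pvSearchA.induct ts M with
  | case1 left right h hc ih =>
    intro h0 hlr hlow hhi
    rw [pvSearchA, dif_pos h, if_pos hc]
    have hb := PySem.Int.floordiv_two_mid_bounds h
    rw [balloons_eq_countE ts hpos] at hc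
    apply ih h0 (by omega) hlow
    have : PySem.Int.floordiv (left + right) 2 - 1 + 1 = PySem.Int.floordiv (left + right) 2 := by ring
    rw [this]; exact hc
  | case2 left right h hc ih =>
    intro h0 hlr hlow hhi
    rw [pvSearchA, dif_pos h, if_neg hc]
    have hb := PySem.Int.floordiv_two_mid_bounds h
    rw [balloons_eq_countE ts hpos] at hc
    apply ih (by omega) (by omega) _ hhi
    intro k hk hklt
    calc countE ts k ≤ countE ts (PySem.Int.floordiv (left + right) 2) :=
          countE_mono ts hpos (by omega)
      _ < M := by omega
  | case3 left right h =>
    intro h0 hlr hlow hhi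
    rw [pvSearchA, dif_neg h]
    have hl : left = right + 1 := by omega
    exact ⟨h0, by rw [hl]; exact hhi, hlow⟩

-- ===== B-side: the event simulation computes the answer =====

-- t * (T/t + 1) is the least multiple of t strictly above T
theorem nextm_gt (t T : Int) (ht : 1 ≤ t) : T < t * (T / t + 1) := by
  have hd := Int.ediv_add_emod T t
  have h1 : 0 ≤ T % t := Int.emod_nonneg T (by omega)
  have h2 : T % t < t := Int.emod_lt_of_pos T (by omega)
  have he : t * (T / t + 1) = t * (T / t) + t := by ring
  omega

theorem nextm_div (t T : Int) (ht : 1 ≤ t) : (t * (T / t + 1)) / t = T / t + 1 :=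
  Int.mul_ediv_cancel_left _ (by omega)

theorem div_eq_of_lt_nextm (t T k : Int) (ht : 1 ≤ t) (h1 : T ≤ k) (h2 : k < t * (T / t + 1)) :
    k / t = T / t := by
  apply le_antisymm
  · have : k / t < T / t + 1 := by
      have := Int.ediv_add_emod k t
      have ha : 0 ≤ k % t := Int.emod_nonneg k (by omega)
      have he : t * (T / t + 1) = t * (T / t) + t := by ring
      nlinarith [Int.ediv_add_emod k t]
    omega
  · exact Int.ediv_le_ediv (by omega) h1

-- one advance step: the pop count closes the gap in countE and the events move to the next multiples
theorem advance_step (staff : List Int) (hpos : ∀ t ∈ staff, 1 ≤ t) (T T' : Int)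
    (hTT' : T ≤ T') (hmin : ∀ t ∈ staff, T' ≤ t * (T / t + 1)) :
    countE staff T + (pvAdvance (staff.map (fun t => (t * (T / t + 1), t))) T').1 = countE staff T'
    ∧ (pvAdvance (staff.map (fun t => (t * (T / t + 1), t))) T').2
        = staff.map (fun t => (t * (T' / t + 1), t)) := by
  induction staff with
  | nil => simp [countE, pvAdvance]
  | cons t rest ih =>
    have ht : 1 ≤ t := hpos t (by simp)
    have hrest := ih (fun u hu => hpos u (by simp [hu])) (fun u hu => hmin u (by simp [hu]))
    by_cases hc : t * (T / t + 1) = T'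
    · have hdiv : T' / t = T / t + 1 := by rw [← hc]; exact nextm_div t T ht
      constructor
      · simp only [List.map_cons, pvAdvance, if_pos hc, countE, List.sum_cons]
        simp only [countE] at hrest
        omega
      · simp only [List.map_cons, pvAdvance, if_pos hc]
        rw [hrest.2]
        have : t * (T / t + 1) + t = t * (T' / t + 1) := by rw [hdiv]; ring
        simp [this]
    · have hlt : T' < t * (T / t + 1) := lt_of_le_of_ne (hmin t (by simp)) (fun h => hc h.symm)
      have hdiv : T' / t = T / t := div_eq_of_lt_nextm t T T' ht hTT' hlt
      constructor
      · simp only [List.map_cons, pvAdvance, if_neg hc, countE, List.sum_cons]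
        simp only [countE] at hrest
        omega
      · simp only [List.map_cons, pvAdvance, if_neg hc]
        rw [hrest.2]
        simp [hdiv]

-- the loop invariant of the simulation
def pvInv (staff : List Int) (M produced T : Int) (evs : List (Int × Int)) : Prop :=
  0 ≤ T ∧ evs = staff.map (fun t => (t * (T / t + 1), t)) ∧
  produced = countE staff T ∧ ∀ k, 0 ≤ k → k < T → countE staff k < M

theorem sim_answer (staff : List Int) (hne : staff ≠ []) (hpos : ∀ t ∈ staff, 1 ≤ t) (M : Int) :
    ∀ (produced T : Int) (evs : List (Int × Int)), pvInv staff M produced T evs →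
      IsAnswer staff M (pvSim M produced T evs) := by
  intro produced T evs
  induction produced, T, evs using pvSim.induct M with
  | case1 produced T evs h hm =>
    intro hinv
    have hevs : evs = [] := by
      have := (PySem.List.min?_eq_none_iff (evs.map Prod.fst) (fun x => x)).mp hm
      simpa using this
    rw [hinv.2.1] at hevs
    exact absurd (List.map_eq_nil_iff.mp hevs) hne
  | case2 produced T evs h T' hm ih =>
    intro hinv
    obtain ⟨hT0, hevs, hprod, hlow⟩ := hinv
    -- T' is a member of the event times, and a lower bound of them
    have hmem : T' ∈ evs.map Prod.fst := PySem.List.min?_mem hm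
    have hisMin := PySem.List.min?_isMin hm
    rw [hevs, List.map_map] at hmem hisMin
    have hmin : ∀ t ∈ staff, T' ≤ t * (T / t + 1) := by
      intro t htm
      exact hisMin _ (List.mem_map.mpr ⟨t, htm, rfl⟩)
    obtain ⟨t0, ht0m, ht0⟩ := List.mem_map.mp hmem
    have hTT' : T < T' := by
      have h1 := nextm_gt t0 T (hpos t0 ht0m)
      have h2 : t0 * (T / t0 + 1) = T' := ht0
      omega
    have hadv := advance_step staff hpos T T' (by omega) hmin
    rw [← hevs] at hadv
    rw [pvSim, dif_pos h]
    split
    · next heq => rw [hm] at heq; cases heq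
    · next T'' heq =>
      have hTs : T'' = T' := by
        rw [hm] at heq
        exact (Option.some.inj heq).symm
      subst hTs
      apply ih
      refine ⟨by omega, hadv.2, by omega, ?_⟩
      intro k hk hkT'
      by_cases hkT : k < T
      · exact hlow k hk hkT
      · have hconst : countE staff k = countE staff T := by
          apply countE_congr
          intro t htm
          exact div_eq_of_lt_nextm t T k (hpos t htm) (by omega)
            (lt_of_lt_of_le hkT' (hmin t htm))
        omega
  | case3 produced T evs h =>
    intro hinv
    rw [pvSim, dif_neg h]
    exact ⟨hinv.1, by have := hinv.2.2.1; omega, hinv.2.2.2⟩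

-- by time t0 * M a staff member with interval t0 has made M balloons
theorem countE_reaches (ts : List Int) (hpos : ∀ t ∈ ts, 1 ≤ t) (M : Int) (hM : 0 ≤ M)
    (t0 : Int) (ht0 : t0 ∈ ts) : M ≤ countE ts (t0 * M) := by
  have ht01 : 1 ≤ t0 := hpos t0 ht0
  have hfd : (t0 * M) / t0 = M := Int.mul_ediv_cancel_left _ (by omega)
  have := countE_lower ts hpos ht0 (show (0:Int) ≤ t0 * M from by positivity)
  omega

theorem map_floordiv_eq_countE (ts : List Int) (hpos : ∀ t ∈ ts, 1 ≤ t) (x : Int) :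
    (ts.map (fun t => PySem.Int.floordiv x t)).sum = countE ts x := by
  unfold countE
  congr 1
  apply List.map_congr_left
  intro t ht
  exact PySem.Int.floordiv_eq_ediv_of_pos (by have := hpos t ht; omega)

-- pointwise: (T1/t) scaled by S is dominated by T1 scaled by the integer weight S/t + 1
theorem ptwise_scale (S T1 t : Int) (hS : 0 < S) (ht : 1 ≤ t) (hT1 : 0 ≤ T1) :
    (T1 / t) * S ≤ T1 * (S / t + 1) := by
  have hq0 : 0 ≤ T1 / t := Int.ediv_nonneg hT1 (by omega)
  have hqt : t * (T1 / t) ≤ T1 := by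
    have h1 := Int.emod_nonneg T1 (by omega : t ≠ 0)
    have h2 := Int.ediv_add_emod T1 t
    omega
  have hS' : S < t * (S / t + 1) := by
    have h1 := Int.emod_lt_of_pos S (by omega : 0 < t)
    have h2 := Int.ediv_add_emod S t
    have h3 : t * (S / t + 1) = t * (S / t) + t := by ring
    omega
  have hw0 : 0 ≤ S / t + 1 := by
    have := Int.ediv_nonneg (by omega : (0:Int) ≤ S) (by omega : (0:Int) ≤ t)
    omega
  calc (T1 / t) * S ≤ (T1 / t) * (t * (S / t + 1)) :=
        mul_le_mul_of_nonneg_left (by omega) hq0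
    _ = (t * (T1 / t)) * (S / t + 1) := by ring
    _ ≤ T1 * (S / t + 1) := mul_le_mul_of_nonneg_right hqt hw0

-- summed over the staff: countE · S ≤ T1 · (w + n)
theorem countE_scale (ts : List Int) (hpos : ∀ t ∈ ts, 1 ≤ t) (S T1 : Int)
    (hS : 0 < S) (hT1 : 0 ≤ T1) :
    countE ts T1 * S ≤ T1 * (countE ts S + ts.length) := by
  induction ts with
  | nil => simp [countE]
  | cons t rest ih =>
    have ht : 1 ≤ t := hpos t (by simp)
    have h1 := ptwise_scale S T1 t hS ht hT1
    have h2 := ih (fun u hu => hpos u (by simp [hu]))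
    simp only [countE, List.map_cons, List.sum_cons, List.length_cons] at *
    push_cast
    nlinarith [h1, h2]

-- the warm start makes strictly fewer than M balloons
theorem countE_start_lt (ts : List Int) (hne : ts ≠ []) (hpos : ∀ t ∈ ts, 1 ≤ t)
    (S M : Int) (hS : 0 < S) (hM : 0 < M) :
    countE ts (max 0 ((M * S - 1) / (countE ts S + ts.length))) < M := by
  have hn : 1 ≤ (ts.length : Int) := by
    have : 0 < ts.length := List.length_pos_iff.mpr hne
    omega
  have hw : 0 ≤ countE ts S := countE_nonneg ts hpos (by omega)
  set d := countE ts S + (ts.length : Int) with hd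
  have hdpos : 0 < d := by omega
  by_cases h : (M * S - 1) / d ≤ 0
  case pos =>
    rw [max_eq_left h, countE_zero ts hpos]; omega
  case neg =>
    rw [max_eq_right (by omega)]
    set T1 := (M * S - 1) / d with hT1d
    have hT1 : 0 ≤ T1 := by omega
    have hkey : countE ts T1 * S ≤ T1 * d := countE_scale ts hpos S T1 hS hT1
    have hdm : T1 * d ≤ M * S - 1 := by
      have h1 := Int.emod_nonneg (M * S - 1) (by omega : d ≠ 0)
      have h2 := Int.ediv_add_emod (M * S - 1) d
      rw [← hT1d] at h2
      have h3 : T1 * d = d * T1 := mul_comm _ _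
      omega
    have : countE ts T1 * S < M * S := by omega
    exact lt_of_mul_lt_mul_right this (by omega)

-- B on a nonpositive quota returns 0 at once
theorem alt_eval_nonpos (N M : Int) (ts : List Int) (hM : M ≤ 0) :
    min_time_to_make_balloons_alt N M ts = 0 := by
  unfold min_time_to_make_balloons_alt
  rw [if_pos hM]

-- B on a positive quota: the warm-started simulation computes the answer
theorem alt_answer (N M : Int) (ts : List Int) (hne : ts ≠ []) (hpos : ∀ t ∈ ts, 1 ≤ t)
    (hM : 0 < M) : IsAnswer ts M (min_time_to_make_balloons_alt N M ts) := by
  have hstart : ∀ st : Int, 0 ≤ st → countE ts st < M →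
      IsAnswer ts M (pvSim M ((ts.map (fun t => PySem.Int.floordiv st t)).sum) st
        (ts.map (fun t => (t * (PySem.Int.floordiv st t + 1), t)))) := by
    intro st hst hlt
    apply sim_answer ts hne hpos M
    refine ⟨hst, ?_, map_floordiv_eq_countE ts hpos st, ?_⟩
    · apply List.map_congr_left
      intro t ht
      rw [PySem.Int.floordiv_eq_ediv_of_pos (by have := hpos t ht; omega)]
    · intro k hk hkst
      calc countE ts k ≤ countE ts st := countE_mono ts hpos (by omega)
        _ < M := hlt
  have hfd : PySem.Int.floordiv
      (M * 18446744073709551616 - 1)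
      ((ts.map (fun t => PySem.Int.floordiv 18446744073709551616 t)).sum + ts.length)
      = (M * 18446744073709551616 - 1) / (countE ts 18446744073709551616 + ts.length) := by
    rw [map_floordiv_eq_countE ts hpos]
    apply PySem.Int.floordiv_eq_ediv_of_pos
    have hw : 0 ≤ countE ts 18446744073709551616 := countE_nonneg ts hpos (by omega)
    have : 0 < ts.length := List.length_pos_iff.mpr hne
    omega
  unfold min_time_to_make_balloons_alt
  rw [if_neg (by omega : ¬ M ≤ 0)]
  show IsAnswer ts M (pvSim M _ _ _)
  rw [hfd]
  apply hstart _ (le_max_left _ _)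
  exact countE_start_lt ts hne hpos _ M (by omega) hM

-- ===== VERDICT (by name: the statement is the Claim_ definition above) =====
theorem min_time_to_make_balloons_spec : Claim_equal_min_time_to_make_balloons := by
  intro N M ts _ hpre
  rcases hpre with ⟨hne, hdisj⟩
  unfold Spec_min_time_to_make_balloons
  unfold min_time_to_make_balloons
  cases hmx : PySem.List.max? ts (fun x => x) with
  | none => exact absurd ((PySem.List.max?_eq_none_iff ts (fun x => x)).mp hmx) hne
  | some mx =>
    have hmxmem : mx ∈ ts := PySem.List.max?_mem hmx
    show pvSearchA ts M 0 (mx * M) = min_time_to_make_balloons_alt N M ts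
    by_cases hM : M < 0
    · -- M < 0: A's interval is empty, B's loop never runs; both return 0
      have hmxpos : 0 < mx := by
        rcases hdisj with hpos | ⟨_, t0, ht0, ht0pos⟩
        · have := hpos mx hmxmem; omega
        · exact lt_of_lt_of_le ht0pos (PySem.List.max?_isMax hmx t0 ht0)
      have hr : mx * M < 0 := mul_neg_of_pos_of_neg hmxpos hM
      rw [alt_eval_nonpos N M ts (by omega), pvSearchA.eq_def, dif_neg (by omega)]
    · have hpos : ∀ t ∈ ts, 1 ≤ t := by
        rcases hdisj with hpos | ⟨hMneg, _⟩
        · exact hpos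
        · omega
      have hmx1 : 1 ≤ mx := hpos mx hmxmem
      -- A computes the answer
      have hA : IsAnswer ts M (pvSearchA ts M 0 (mx * M)) := by
        apply searchA_answer ts M hpos 0 (mx * M) (le_refl _)
          (by nlinarith) (fun k hk hkl => by omega)
        calc M ≤ countE ts (mx * M) := countE_reaches ts hpos M (by omega) mx hmxmem
          _ ≤ countE ts (mx * M + 1) := countE_mono ts hpos (by omega)
      -- B computes the answer
      by_cases hM0 : 0 < M
      · exact answer_unique ts M hA (alt_answer N M ts hne hpos hM0)
      · -- M = 0: A's search returns the least time with ≥ 0 balloons, which is 0, and B returns 0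
        have h0 : IsAnswer ts M 0 :=
          ⟨le_rfl, by rw [countE_zero ts hpos]; omega, fun k hk hkl => by omega⟩
        rw [alt_eval_nonpos N M ts (by omega)]
        exact answer_unique ts M hA h0
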